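-- pv_equiv track=rewrite | github.com/jeena5555/coding-with-python-mini-project | checkmate.py | check_diagonal_lines
-- ===== SOURCE A (Python) =====
-- def check_diagonal_lines(board, king_pos):
--     """
--     หาแนวทแยงมุม นับจาก king (หา Bishop, Queen)
--     """
--     k_x, k_y = king_pos
--     board_size = len(board)
--     # ล่างขวา, ล่างซ้าย, บนขวา, บนซ้าย
--     directions = [(1, 1), (1, -1), (-1, 1), (-1, -1)]
--
--     for dx, dy in directions:
--         x, y = k_x + dx, k_y + dy
--
--         while 0 <= x < board_size and 0 <= y < board_size:
--             piece = board[x][y]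
--             if piece in 'BQ':
--                 return True
--             if piece != '.':
--                 break
--             x += dx
--             y += dy
--
--     return False
-- ===== SOURCE B (Python) =====
-- def check_diagonal_lines(board, king_pos):
--     """Breadth-first over distance: one outer loop on d, keeping the set of still-open diagonal directions."""
--     k_x, k_y = king_pos
--     n = len(board)
--     open_dirs = [(1, 1), (1, -1), (-1, 1), (-1, -1)]
--     for d in range(1, n + 1):
--         if not open_dirs:
--             break
--         still = []
--         for dx, dy in open_dirs:
--             x, y = k_x + dx * d, k_y + dy * d
--             if 0 <= x < n and 0 <= y < n:
--                 piece = board[x][y]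
--                 if piece in 'BQ':
--                     return True
--                 if piece == '.':
--                     still.append((dx, dy))
--         open_dirs = still
--     return False
-- ===== Notes on version B (the rewrite author's own statement) =====
-- stated objective: alternative
-- what changed: A scans each of the four diagonal rays to completion in turn (direction-major, a while loop per direction); B runs one outer loop over the distance d = 1..n, probing all still-open directions at distance d and dropping a direction when it leaves the board or meets a non-'.' non-'BQ' blocker (distance-major breadth-first).
-- outside the precondition, e.g. on check_diagonal_lines([['.', '.', '.'], ['.', 'x', '.'], ['.', '.']], (0, 0)): A returns False, B returns False
import Mathlib
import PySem

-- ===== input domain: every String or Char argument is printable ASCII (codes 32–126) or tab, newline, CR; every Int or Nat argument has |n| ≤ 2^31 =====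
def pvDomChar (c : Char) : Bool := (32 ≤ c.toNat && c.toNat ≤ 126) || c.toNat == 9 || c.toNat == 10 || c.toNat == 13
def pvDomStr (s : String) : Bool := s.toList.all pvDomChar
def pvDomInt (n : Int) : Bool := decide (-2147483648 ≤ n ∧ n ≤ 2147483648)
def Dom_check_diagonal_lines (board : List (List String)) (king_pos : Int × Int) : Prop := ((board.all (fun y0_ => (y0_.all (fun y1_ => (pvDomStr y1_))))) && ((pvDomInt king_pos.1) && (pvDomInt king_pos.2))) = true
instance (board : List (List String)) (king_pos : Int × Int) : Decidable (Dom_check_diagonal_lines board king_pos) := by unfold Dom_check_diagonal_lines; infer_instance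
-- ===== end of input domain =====

-- B replaces A's direction-major ray scans by one distance-major loop over d = 1..n that keeps
-- the still-open diagonal directions (objective: alternative decomposition, same cost).


-- ===== PORT A =====
-- board[x][y]; exact wherever Python does not raise (Pre_ excludes boards where a reached row is too short)
def pvCell (board : List (List String)) (x y : Int) : String :=
  ((PySem.List.pyGet? ((PySem.List.pyGet? board x).getD []) y).getD "")

-- piece in 'BQ'  (Python substring test)
def pvIsBQ (piece : String) : Bool := PySem.Str.isIn piece "BQ"

-- A's inner while loop for one direction; fuel = board size bounds the number of iterations
-- (the in-bounds positions along a ray are at most n, each consuming one fuel; once out of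
-- bounds both the loop and the fuel-0 case return false).
def pvScanA (board : List (List String)) (n dx dy x y : Int) : Nat → Bool
  | 0 => false
  | f + 1 =>
    if 0 ≤ x && x < n && 0 ≤ y && y < n then
      let piece := pvCell board x y
      if pvIsBQ piece then true
      else if piece ≠ "." then false
      else pvScanA board n dx dy (x + dx) (y + dy) f
    else false

def check_diagonal_lines (board : List (List String)) (king_pos : Int × Int) : Bool :=
  let n : Int := board.length
  -- for dx, dy in directions: … return True … ; return False  ≡  any
  [((1 : Int), (1 : Int)), (1, -1), (-1, 1), (-1, -1)].any
    (fun dir => pvScanA board n dir.1 dir.2 (king_pos.1 + dir.1) (king_pos.2 + dir.2) board.length)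

-- ===== PORT B =====
-- B's inner for loop over the open directions at distance d: none = early `return True`,
-- some still = the directions kept open.
def pvStepB (board : List (List String)) (n kx ky d : Int) : List (Int × Int) → Option (List (Int × Int))
  | [] => some []
  | dir :: rest =>
    let x := kx + dir.1 * d
    let y := ky + dir.2 * d
    if 0 ≤ x && x < n && 0 ≤ y && y < n then
      let piece := pvCell board x y
      if pvIsBQ piece then none
      else if piece = "." then (pvStepB board n kx ky d rest).map (dir :: ·)
      else pvStepB board n kx ky d rest
    else pvStepB board n kx ky d rest

-- B's outer loop: for d in range(1, n+1), breaking when no direction is open; fuel = n counts d.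
def pvGoB (board : List (List String)) (n kx ky : Int) (dirs : List (Int × Int)) (d : Int) : Nat → Bool
  | 0 => false
  | f + 1 =>
    if dirs.isEmpty then false
    else
      match pvStepB board n kx ky d dirs with
      | none => true
      | some still => pvGoB board n kx ky still (d + 1) f

def check_diagonal_lines_alt (board : List (List String)) (king_pos : Int × Int) : Bool :=
  pvGoB board (board.length : Int) king_pos.1 king_pos.2
    [((1 : Int), (1 : Int)), (1, -1), (-1, 1), (-1, -1)] 1 board.length

-- ===== PRECONDITION & SPEC =====
-- A indexes row i only at the two columns king_pos.2 ± (i - king_pos.1) (the king's diagonals).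
-- Pre_ excludes boards where such a potentially-indexed cell is missing (the row too short):
-- there A can raise IndexError; on some such boards A still returns (an earlier blocker stops
-- the scan), so this is a mild narrowing, stated here and cited in the claim.
def Pre_check_diagonal_lines (board : List (List String)) (king_pos : Int × Int) : Prop :=
  ∀ i ∈ List.range board.length,
    ∀ y ∈ [king_pos.2 + ((i : Int) - king_pos.1), king_pos.2 - ((i : Int) - king_pos.1)],
      (i : Int) ≠ king_pos.1 → 0 ≤ y → y < (board.length : Int) →
        y < ((board.getD i []).length : Int)
instance (board : List (List String)) (king_pos : Int × Int) : Decidable (Pre_check_diagonal_lines board king_pos) := by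
  unfold Pre_check_diagonal_lines; infer_instance

def pvWitness_check_diagonal_lines : List (List String) × (Int × Int) := ([[".", "."], ["B", "."]], (0, 0))

def Spec_check_diagonal_lines (board : List (List String)) (king_pos : Int × Int) (out : Bool) : Prop := out = check_diagonal_lines_alt board king_pos
instance (board : List (List String)) (king_pos : Int × Int) (out : Bool) : Decidable (Spec_check_diagonal_lines board king_pos out) := by unfold Spec_check_diagonal_lines; infer_instance

-- ===== CLAIM (what is proved, stated in full; the proofs are below) =====
def Claim_equal_check_diagonal_lines : Prop := ∀ (board : List (List String)) (king_pos : Int × Int), Dom_check_diagonal_lines board king_pos → Pre_check_diagonal_lines board king_pos → Spec_check_diagonal_lines board king_pos (check_diagonal_lines board king_pos)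

-- ===== LEMMAS AND PROOFS =====

lemma pvGoB_nil (board : List (List String)) (n kx ky d : Int) (f : Nat) :
    pvGoB board n kx ky [] d f = false := by
  cases f <;> simp [pvGoB]

-- B's inner pass at distance d, followed by the rest of B's loop, computes exactly the
-- disjunction of A's ray scans started at distance d with fuel f + 1.
lemma pvStepB_eq (board : List (List String)) (n kx ky : Int) (f : Nat)
    (IH : ∀ (dirs : List (Int × Int)) (d : Int),
      pvGoB board n kx ky dirs d f =
        dirs.any (fun dir => pvScanA board n dir.1 dir.2 (kx + dir.1 * d) (ky + dir.2 * d) f)) :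
    ∀ (dirs : List (Int × Int)) (d : Int),
      (match pvStepB board n kx ky d dirs with
        | none => true
        | some still => pvGoB board n kx ky still (d + 1) f) =
      dirs.any (fun dir => pvScanA board n dir.1 dir.2 (kx + dir.1 * d) (ky + dir.2 * d) (f + 1)) := by
  intro dirs
  induction dirs with
  | nil =>
    intro d
    simp [pvStepB, pvGoB_nil]
  | cons dir rest ih =>
    intro d
    simp only [pvStepB, List.any_cons]
    by_cases hb : (0 ≤ kx + dir.1 * d && kx + dir.1 * d < n && 0 ≤ ky + dir.2 * d && ky + dir.2 * d < n) = true
    · by_cases hq : pvIsBQ (pvCell board (kx + dir.1 * d) (ky + dir.2 * d)) = true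
      · simp [pvScanA, hb, hq]
      · by_cases hdot : pvCell board (kx + dir.1 * d) (ky + dir.2 * d) = "."
        have hqd : pvIsBQ "." = false := by decide
        · cases hrest : pvStepB board n kx ky d rest with
          | none =>
            have := ih d
            rw [hrest] at this
            simp only [hb, hdot, hqd, if_true, hrest, Option.map_none] at *
            simp [← this]
          | some s =>
            have hscan : pvScanA board n dir.1 dir.2 (kx + dir.1 * d) (ky + dir.2 * d) (f + 1) =
                pvScanA board n dir.1 dir.2 (kx + dir.1 * (d + 1)) (ky + dir.2 * (d + 1)) f := by
              simp only [pvScanA, hb, if_true, hdot, hqd, ne_eq, not_true_eq_false, if_false,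
                Bool.false_eq_true]
              have hx : kx + dir.1 * d + dir.1 = kx + dir.1 * (d + 1) := by ring
              have hy : ky + dir.2 * d + dir.2 = ky + dir.2 * (d + 1) := by ring
              rw [hx, hy]
            have hrest' := ih d
            rw [hrest] at hrest'
            simp only [hb, hdot, hqd, if_true, Option.map_some, Bool.false_eq_true, if_false]
            rw [IH, List.any_cons, hscan, ← hrest']
            simp only [IH]
        · have hfalse : pvScanA board n dir.1 dir.2 (kx + dir.1 * d) (ky + dir.2 * d) (f + 1) = false := by
            simp [pvScanA, hb, hq, hdot]
          simp only [hb, hq, hdot, if_true, if_false, hfalse, Bool.false_or]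
          exact ih d
    · have hfalse : pvScanA board n dir.1 dir.2 (kx + dir.1 * d) (ky + dir.2 * d) (f + 1) = false := by
        simp [pvScanA, hb]
      simp only [hb, hfalse, Bool.false_or]
      exact ih d

-- B's loop from distance d with fuel f equals the disjunction of A's ray scans with the same fuel.
lemma pvGoB_eq (board : List (List String)) (n kx ky : Int) (f : Nat) :
    ∀ (dirs : List (Int × Int)) (d : Int),
      pvGoB board n kx ky dirs d f =
        dirs.any (fun dir => pvScanA board n dir.1 dir.2 (kx + dir.1 * d) (ky + dir.2 * d) f) := by
  induction f with
  | zero => intro dirs d; simp [pvGoB, pvScanA]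
  | succ f IH =>
    intro dirs d
    cases dirs with
    | nil => simp [pvGoB_nil]
    | cons dir rest =>
      show (match pvStepB board n kx ky d (dir :: rest) with
        | none => true
        | some still => pvGoB board n kx ky still (d + 1) f) = _
      exact pvStepB_eq board n kx ky f IH (dir :: rest) d

-- ===== VERDICT (by name: the statement is the Claim_ definition above) =====
theorem check_diagonal_lines_spec : Claim_equal_check_diagonal_lines := by
  unfold Claim_equal_check_diagonal_lines
  intro board king_pos _ _
  unfold Spec_check_diagonal_lines check_diagonal_lines check_diagonal_lines_alt
  rw [pvGoB_eq]
  simp [mul_one]
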